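-- pv_equiv track=rewrite | github.com/Dhruval10/Programming-Problems-Solution | Easy/905. Sort Array By Parity.py | sortArrayByParity
-- ===== SOURCE A (Python) =====
-- from typing import List
--
-- def sortArrayByParity(A: List[int]) -> List[int]:
--     odd_nums = []
--     even_nums = []
--
--     for i in range(len(A)):
--         if A[i] % 2 == 0:
--             even_nums.append(A[i])
--         else:
--             odd_nums.append(A[i])
--
--     return even_nums + odd_nums
-- ===== SOURCE B (Python) =====
-- from typing import List
--
-- def sortArrayByParity(A: List[int]) -> List[int]:
--     return sorted(A, key=lambda x: x % 2)
-- ===== Notes on version B (the rewrite author's own statement) =====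
-- stated objective: idiomatic
-- what changed: Replaces the explicit partition into two appended lists by a single stable sort keyed on parity (sorted(A, key=lambda x: x % 2)), which preserves relative order within each parity group and thus returns the same list.
import Mathlib
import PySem

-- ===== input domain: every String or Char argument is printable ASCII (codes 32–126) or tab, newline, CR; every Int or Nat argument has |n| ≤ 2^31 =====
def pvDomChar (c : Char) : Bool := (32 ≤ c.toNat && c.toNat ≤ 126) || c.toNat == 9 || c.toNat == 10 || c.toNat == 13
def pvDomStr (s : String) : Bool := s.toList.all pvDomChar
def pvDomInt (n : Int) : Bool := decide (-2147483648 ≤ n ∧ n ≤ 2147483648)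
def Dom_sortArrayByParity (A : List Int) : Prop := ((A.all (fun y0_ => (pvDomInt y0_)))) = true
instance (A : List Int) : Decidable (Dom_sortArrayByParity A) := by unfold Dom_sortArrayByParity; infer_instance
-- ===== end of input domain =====

-- B replaces A's explicit two-list partition by one stable sort keyed on parity (idiomatic; same result by stability).


-- ===== PORT A =====
-- One iteration of A's loop body: st = (odd_nums, even_nums); append x to the right list.
def pvStepA (st : List Int × List Int) (x : Int) : List Int × List Int :=
  if PySem.Int.mod x 2 = 0 then (st.1, st.2 ++ [x]) else (st.1 ++ [x], st.2)

-- Loop over range(len(A)); A[i] is always in range here, so pyGetD is exact.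
def sortArrayByParity (A : List Int) : List Int :=
  let st := (PySem.List.pyRange 0 (A.length : Int)).foldl
    (fun st i => pvStepA st (PySem.List.pyGetD A i 0)) ([], [])
  st.2 ++ st.1

-- ===== PORT B =====
def sortArrayByParity_alt (A : List Int) : List Int :=
  PySem.List.sorted A (fun x => PySem.Int.mod x 2)

-- ===== PRECONDITION & SPEC =====
def Spec_sortArrayByParity (A : List Int) (out : List Int) : Prop := out = sortArrayByParity_alt A
instance (A : List Int) (out : List Int) : Decidable (Spec_sortArrayByParity A out) := by unfold Spec_sortArrayByParity; infer_instance

-- ===== CLAIM (what is proved, stated in full; the proofs are below) =====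
def Claim_equal_sortArrayByParity : Prop := ∀ (A : List Int), Dom_sortArrayByParity A → Spec_sortArrayByParity A (sortArrayByParity A)

-- ===== LEMMAS AND PROOFS =====

theorem mod2_eq (y : Int) : PySem.Int.mod y 2 = y % 2 := by
  simp only [PySem.Int.mod]
  rw [Int.fmod_eq_emod_of_nonneg _ (by norm_num)]

theorem insert_even (x : Int) (e o : List Int)
    (hx : x % 2 = 0)
    (he : ∀ y ∈ e, y % 2 = 0)
    (ho : ∀ y ∈ o, y % 2 ≠ 0) :
    PySem.List.insertBy (fun a b => decide (a % 2 < b % 2)) x (e ++ o)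
      = (e ++ [x]) ++ o := by
  induction e with
  | nil =>
    cases o with
    | nil => simp [PySem.List.insertBy]
    | cons y ys =>
      have hy : y % 2 = 1 := by have := ho y (by simp); omega
      simp [PySem.List.insertBy, hx, hy]
  | cons z e ih =>
    have hz : z % 2 = 0 := he z (by simp)
    simp only [List.cons_append, PySem.List.insertBy, hx, hz]
    simp only [show ¬((0:Int) < 0) by omega, decide_false, Bool.false_eq_true, if_false]
    rw [ih (fun y hy => he y (by simp [hy]))]

theorem insert_odd (x : Int) (l : List Int)
    (hx : x % 2 ≠ 0) :
    PySem.List.insertBy (fun a b => decide (a % 2 < b % 2)) x l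
      = l ++ [x] := by
  apply PySem.List.insertBy_of_forall_not_before
  intro y _
  simp only [decide_eq_false_iff_not]
  omega

theorem loop_eq (l : List Int) :
    ∀ (o e : List Int),
    (∀ y ∈ e, y % 2 = 0) → (∀ y ∈ o, y % 2 ≠ 0) →
    l.foldl (fun acc x =>
        PySem.List.insertBy (fun a b => decide (a % 2 < b % 2)) x acc)
      (e ++ o)
    = (let st := l.foldl pvStepA (o, e); st.2 ++ st.1) := by
  induction l with
  | nil => intro o e _ _; simp
  | cons x l ih =>
    intro o e he ho
    by_cases hx : x % 2 = 0
    · simp only [List.foldl_cons]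
      rw [show pvStepA (o, e) x = (o, e ++ [x]) by simp [pvStepA, hx],
        insert_even x e o hx he ho]
      refine ih o (e ++ [x]) ?_ ho
      intro y hy
      rcases List.mem_append.mp hy with h | h
      · exact he y h
      · simp at h; omega
    · simp only [List.foldl_cons]
      rw [show pvStepA (o, e) x = (o ++ [x], e) by simp [pvStepA, hx],
        insert_odd x (e ++ o) hx, List.append_assoc]
      refine ih (o ++ [x]) e he ?_
      intro y hy
      rcases List.mem_append.mp hy with h | h
      · exact ho y h
      · simp at h; omega

-- ===== VERDICT (by name: the statement is the Claim_ definition above) =====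
theorem sortArrayByParity_spec : Claim_equal_sortArrayByParity := by
  intro A _
  unfold Spec_sortArrayByParity sortArrayByParity sortArrayByParity_alt
  rw [PySem.List.sorted_eq_foldl_insertBy]
  simp only [mod2_eq]
  show (let st := List.foldl (fun acc j => pvStepA acc (PySem.List.pyGetD A j 0)) ([], [])
          (PySem.List.pyRange 0 (A.length : Int)); st.2 ++ st.1) = _
  rw [PySem.List.foldl_pyRange_pyGetD' A 0 pvStepA ([], []) (le_refl 0)]
  simp only [Int.toNat_zero, List.drop_zero]
  exact (loop_eq A [] [] (by simp) (by simp)).symm
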